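-- pv_equiv track=rewrite | github.com/rFurgan/Log-Analyzer | Python/log_analyzer.py | __summarize_times
-- ===== SOURCE A (Python) =====
-- def __summarize_times(summaries):
--     """ Calculate and return time differences of each interaction """
--     text = ""
--     divider_lines=[]
--     counter = 0
--     for summary in summaries:
--         divider_lines.append(text.count('\n'))
--         text += f"------------- #{counter} -------------\n"
--         for key, value in summary.items():
--             text += f"{key:<15}: {value}\n"
--         counter += 1
--     return text, divider_lines
-- ===== SOURCE B (Python) =====
-- def __summarize_times(summaries):
--     """ Calculate and return time differences of each interaction """
--     blocks = []
--     for i, summary in enumerate(summaries):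
--         block = f"------------- #{i} -------------\n" + "".join(
--             f"{key:<15}: {value}\n" for key, value in summary.items())
--         blocks.append(block)
--     counts = [b.count('\n') for b in blocks]
--     divider_lines = []
--     total = 0
--     for c in counts:
--         divider_lines.append(total)
--         total += c
--     return "".join(blocks), divider_lines
-- ===== Notes on version B (the rewrite author's own statement) =====
-- stated objective: faster
-- what changed: Instead of one incremental loop that re-counts the newlines of the whole accumulated text before each block, B formats each summary into its own block string, joins them, and derives the offsets as prefix sums of the per-block newline counts.
import Mathlib
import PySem

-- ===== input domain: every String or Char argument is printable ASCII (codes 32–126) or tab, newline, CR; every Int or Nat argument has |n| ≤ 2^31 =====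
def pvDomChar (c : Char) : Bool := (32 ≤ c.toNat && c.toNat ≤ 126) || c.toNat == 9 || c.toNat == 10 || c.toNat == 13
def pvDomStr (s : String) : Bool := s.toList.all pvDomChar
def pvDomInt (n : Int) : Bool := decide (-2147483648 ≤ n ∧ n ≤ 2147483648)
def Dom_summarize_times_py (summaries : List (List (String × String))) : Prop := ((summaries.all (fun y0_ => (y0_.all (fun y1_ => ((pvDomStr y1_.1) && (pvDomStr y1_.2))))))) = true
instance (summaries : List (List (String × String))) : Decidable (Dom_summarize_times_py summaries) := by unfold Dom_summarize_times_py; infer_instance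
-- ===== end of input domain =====

-- B builds each summary's block separately, joins them, and derives the offsets by one
-- prefix-sum pass over the blocks' newline counts, instead of A's single incremental loop
-- that re-counts the newlines of the whole accumulated text before every block (objective: faster).

-- shared formatting helper: f"{key:<15}: {value}\n" as a list of chars (ASCII, so len = char count)
def pvEntry (kv : String × String) : List Char :=
  (kv.1.toList ++ List.replicate (15 - kv.1.toList.length) ' ') ++ ": ".toList ++ kv.2.toList ++ ['\n']

-- header line f"------------- #{i} -------------\n"
def pvHeader (i : Int) : List Char :=
  "------------- #".toList ++ PySem.Int.toChars i ++ " -------------\n".toList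

-- ===== PORT A =====
-- A's single loop over summaries with state (text, divider_lines, counter); the dict
-- iteration 'summary.items()' is (PySem.Dict.ofList summary).items.
def summarize_times_py (summaries : List (List (String × String))) : String × List Int :=
  let r := summaries.foldl
    (fun (st : List Char × List Int × Int) summary =>
      let divs := st.2.1 ++ [((PySem.Chars.count st.1 ['\n'] : Nat) : Int)]
      let text := st.1 ++ pvHeader st.2.2
      let text := (PySem.Dict.ofList summary).items.foldl (fun t kv => t ++ pvEntry kv) text
      (text, divs, st.2.2 + 1))
    ([], [], 0)
  (String.ofList r.1, r.2.1)

-- ===== PORT B =====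
-- B: blocks per (index, summary) via enumerate, joined; offsets = running prefix sums of
-- the blocks' own newline counts.
def pvBlock (p : Int × List (String × String)) : List Char :=
  pvHeader p.1 ++ ((PySem.Dict.ofList p.2).items.flatMap pvEntry)

def summarize_times_py_alt (summaries : List (List (String × String))) : String × List Int :=
  let blocks := (PySem.List.enumerate summaries 0).map pvBlock
  let counts := blocks.map (fun b => ((PySem.Chars.count b ['\n'] : Nat) : Int))
  let divs := (counts.foldl (fun (st : List Int × Int) c => (st.1 ++ [st.2], st.2 + c)) ([], 0)).1
  (String.ofList blocks.flatten, divs)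

-- ===== PRECONDITION & SPEC =====
def Spec_summarize_times_py (summaries : List (List (String × String))) (out : String × List Int) : Prop := out = summarize_times_py_alt summaries
instance (summaries : List (List (String × String))) (out : String × List Int) : Decidable (Spec_summarize_times_py summaries out) := by unfold Spec_summarize_times_py; infer_instance

-- ===== CLAIM (what is proved, stated in full; the proofs are below) =====
def Claim_equal_summarize_times_py : Prop := ∀ (summaries : List (List (String × String))), Dom_summarize_times_py summaries → Spec_summarize_times_py summaries (summarize_times_py summaries)

-- ===== LEMMAS AND PROOFS =====

-- prefix sums starting at a
def pvPsums (a : Int) : List Int → List Int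
  | [] => []
  | c :: cs => a :: pvPsums (a + c) cs

-- Python's s.count(sub) for a single-character sub is just the character count
theorem pvCountGo_singleton (c : Char) (l : List Char) (fuel acc : Nat)
    (h : l.length ≤ fuel) :
    PySem.Chars.count.go [c] fuel l acc = acc + l.count c := by
  induction l generalizing fuel acc with
  | nil => cases fuel <;> simp [PySem.Chars.count.go]
  | cons x t ih =>
    cases fuel with
    | zero => simp at h
    | succ n =>
      simp only [List.length_cons, Nat.add_le_add_iff_right] at h
      by_cases hx : c = x
      · subst hx
        simp [PySem.Chars.count.go, List.isPrefixOf, ih _ _ h]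
        omega
      · have hpre : ¬ ([c].isPrefixOf (x :: t) = true) := by
          simp [List.isPrefixOf]
          exact hx
        simp [PySem.Chars.count.go, hpre, ih _ _ h, List.count_cons, beq_iff_eq]
        exact fun hh => hx hh.symm

theorem pvCount_singleton (s : List Char) (c : Char) :
    PySem.Chars.count s [c] = s.count c := by
  have := pvCountGo_singleton c s s.length 0 le_rfl
  simpa [PySem.Chars.count] using this

theorem pvEnumerate_cons {α : Type} (x : α) (xs : List α) (s : Int) :
    PySem.List.enumerate (x :: xs) s = (s, x) :: PySem.List.enumerate xs (s + 1) := by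
  simp [PySem.List.enumerate]

-- A's whole loop, generalized over its accumulator
theorem pvFoldA (ss : List (List (String × String))) (text : List Char) (divs : List Int)
    (counter : Int) :
    ss.foldl
      (fun (st : List Char × List Int × Int) summary =>
        let ds := st.2.1 ++ [((PySem.Chars.count st.1 ['\n'] : Nat) : Int)]
        let t := st.1 ++ pvHeader st.2.2
        let t := (PySem.Dict.ofList summary).items.foldl (fun t kv => t ++ pvEntry kv) t
        (t, ds, st.2.2 + 1))
      (text, divs, counter)
    = (text ++ ((PySem.List.enumerate ss counter).map pvBlock).flatten,
       divs ++ pvPsums ((text.count '\n' : Nat) : Int)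
         (((PySem.List.enumerate ss counter).map pvBlock).map
           (fun b => ((b.count '\n' : Nat) : Int))),
       counter + ss.length) := by
  induction ss generalizing text divs counter with
  | nil => simp [PySem.List.enumerate, pvPsums]
  | cons s rest ih =>
    rw [List.foldl_cons]
    simp only [PySem.List.foldl_append_eq_flatMap] at ih ⊢
    rw [ih]
    rw [pvEnumerate_cons]
    simp only [List.map_cons, List.flatten_cons, pvPsums, pvBlock, pvCount_singleton,
      List.count_append, List.append_assoc, List.cons_append, List.length_cons,
      Prod.mk.injEq]
    refine ⟨trivial, ?_, ?_⟩
    · simp only [List.nil_append]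
      norm_cast
    · push_cast
      ring

-- B's prefix-sum loop produces pvPsums
theorem pvFoldPsums (counts : List Int) (acc : List Int) (tot : Int) :
    (counts.foldl (fun (st : List Int × Int) c => (st.1 ++ [st.2], st.2 + c)) (acc, tot)).1
      = acc ++ pvPsums tot counts := by
  induction counts generalizing acc tot with
  | nil => simp [pvPsums]
  | cons c cs ih => simp [pvPsums, ih]

-- ===== VERDICT (by name: the statement is the Claim_ definition above) =====
theorem summarize_times_py_spec : Claim_equal_summarize_times_py := by
  intro summaries _
  unfold Spec_summarize_times_py summarize_times_py summarize_times_py_alt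
  rw [pvFoldA]
  simp [pvFoldPsums, pvCount_singleton]
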